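-- pv_equiv track=rewrite | github.com/Hironobu-Fukuzawa/portfolio | python/hackerRank/getQueryResults.py | getGoodArray
-- ===== SOURCE A (Python) =====
-- def getGoodArray(n):
--     good_arr = []
--     count = 0
--     while n >= 1:
--         mod = n % 2
--         if mod == 1:
--             good_arr.append(2 ** count)
--         n = n // 2
--         count += 1
--     return good_arr
-- ===== SOURCE B (Python) =====
-- def getGoodArray(n):
--     if n < 1:
--         return []
--     rest = [2 * x for x in getGoodArray(n // 2)]
--     return [1] + rest if n % 2 == 1 else rest
-- ===== Notes on version B (the rewrite author's own statement) =====
-- stated objective: alternative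
-- what changed: Replaces the iterative loop with its count variable and explicit powers by a structural recursion: recurse on the halved input, double every element of the recursive result, and prepend the lowest power when the input is odd.
import Mathlib
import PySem

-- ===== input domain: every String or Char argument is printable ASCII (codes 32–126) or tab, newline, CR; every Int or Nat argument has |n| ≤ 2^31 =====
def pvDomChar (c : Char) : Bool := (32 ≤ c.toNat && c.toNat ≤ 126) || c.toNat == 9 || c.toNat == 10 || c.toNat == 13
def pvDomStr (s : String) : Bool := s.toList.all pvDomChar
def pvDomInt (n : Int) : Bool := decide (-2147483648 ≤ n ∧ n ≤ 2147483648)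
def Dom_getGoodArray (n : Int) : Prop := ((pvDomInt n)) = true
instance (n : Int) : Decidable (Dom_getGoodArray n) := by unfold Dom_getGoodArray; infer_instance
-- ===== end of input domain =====

-- B replaces A's counting loop by a structural recursion on n // 2 (alternative decomposition, same cost).

-- ===== PORT A =====
-- while n >= 1: mod = n % 2; if mod == 1: append 2 ** count; n = n // 2; count += 1
def getGoodArrayLoop (n : Int) (count : Nat) (acc : List Int) : List Int :=
  if 1 ≤ n then
    getGoodArrayLoop (PySem.Int.floordiv n 2) (count + 1)
      (if PySem.Int.mod n 2 = 1 then acc ++ [2 ^ count] else acc)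
  else acc
termination_by n.toNat
decreasing_by
  simp only [PySem.Int.floordiv_eq_ediv_of_pos (by norm_num : (0:Int) < 2)]
  omega

def getGoodArray (n : Int) : List Int := getGoodArrayLoop n 0 []

-- ===== PORT B =====
def getGoodArray_alt (n : Int) : List Int :=
  if n < 1 then []
  else
    let rest := (getGoodArray_alt (PySem.Int.floordiv n 2)).map (fun x => 2 * x)
    if PySem.Int.mod n 2 = 1 then 1 :: rest else rest
termination_by n.toNat
decreasing_by
  simp only [PySem.Int.floordiv_eq_ediv_of_pos (by norm_num : (0:Int) < 2)]
  omega

-- ===== PRECONDITION & SPEC =====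
def Spec_getGoodArray (n : Int) (out : List Int) : Prop := out = getGoodArray_alt n
instance (n : Int) (out : List Int) : Decidable (Spec_getGoodArray n out) := by unfold Spec_getGoodArray; infer_instance

-- ===== CLAIM (what is proved, stated in full; the proofs are below) =====
def Claim_equal_getGoodArray : Prop := ∀ (n : Int), Dom_getGoodArray n → Spec_getGoodArray n (getGoodArray n)

-- ===== LEMMAS AND PROOFS =====
lemma getGoodArrayLoop_eq_alt (k : Nat) :
    ∀ (n : Int), n.toNat = k → ∀ (c : Nat) (acc : List Int),
      getGoodArrayLoop n c acc = acc ++ (getGoodArray_alt n).map (fun x => (2 : Int) ^ c * x) := by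
  induction k using Nat.strong_induction_on with
  | _ k ih =>
    intro n hk c acc
    rw [getGoodArrayLoop, getGoodArray_alt]
    by_cases h1 : 1 ≤ n
    · have hlt : ¬ n < 1 := by omega
      have hdec : (PySem.Int.floordiv n 2).toNat < k := by
        rw [PySem.Int.floordiv_eq_ediv_of_pos (by norm_num : (0:Int) < 2)]; omega
      rw [if_pos h1, if_neg hlt,
        ih _ hdec (PySem.Int.floordiv n 2) rfl (c + 1)]
      simp only [PySem.Int.mod_eq_emod_of_pos (show (0:Int) < 2 by norm_num),
        PySem.Int.floordiv_eq_ediv_of_pos (show (0:Int) < 2 by norm_num)]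
      by_cases hm : n % 2 = 1
      · simp [hm, List.map_map, Function.comp_def, pow_succ, mul_assoc]
      · simp [hm, List.map_map, Function.comp_def, pow_succ, mul_assoc]
    · rw [if_neg h1, if_pos (by omega)]
      simp

-- ===== VERDICT (by name: the statement is the Claim_ definition above) =====
theorem getGoodArray_spec : Claim_equal_getGoodArray := by
  intro n _
  unfold Spec_getGoodArray getGoodArray
  rw [getGoodArrayLoop_eq_alt n.toNat n rfl 0 []]
  simp
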